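-- pv_equiv track=rewrite | github.com/feelps-1/MangueCIN | Lista4/buga/shiny.py | cifra_pokemon
-- ===== SOURCE A (Python) =====
-- def cifra_pokemon(criatura, passos, segundos):
--     alfabeto = ['a', 'b', 'c', 'd', 'e', 'f', 'g', 'h', 'i', 'j', 'k', 'l', 'm',
--                 'n', 'o', 'p', 'q', 'r', 's', 't', 'u', 'v', 'w', 'x', 'y', 'z']
--
--     cifrado = ['a', 'b', 'c', 'd', 'e', 'f', 'g', 'h', 'i', 'j', 'k', 'l', 'm',
--                'n', 'o', 'p', 'q', 'r', 's', 't', 'u', 'v', 'w', 'x', 'y', 'z']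
--
--     for i in range(passos):
--         cifrado.append(cifrado.pop(0))
--
--     nomecifrado = ""
--
--     for i in criatura:
--         nomecifrado += cifrado[alfabeto.index(i.lower())]
--
--     idn = 0
--
--     for j in nomecifrado:
--         idn += ord(j)
--
--     idn = idn * segundos
--
--     return str(idn)[-1]
-- ===== SOURCE B (Python) =====
-- def cifra_pokemon(criatura, passos, segundos):
--     shift = max(passos, 0) % 26
--     total = 0
--     for c in criatura:
--         total += (ord(c.lower()) - ord('a') + shift) % 26 + ord('a')
--     return str(total * segundos)[-1]
-- ===== Notes on version B (the rewrite author's own statement) =====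
-- stated objective: faster
-- what changed: B drops A's passos-iteration list rotation and the intermediate ciphered string: it computes the shift as max(passos,0)%26 once and sums each character's cipher code arithmetically in a single pass.
import Mathlib
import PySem

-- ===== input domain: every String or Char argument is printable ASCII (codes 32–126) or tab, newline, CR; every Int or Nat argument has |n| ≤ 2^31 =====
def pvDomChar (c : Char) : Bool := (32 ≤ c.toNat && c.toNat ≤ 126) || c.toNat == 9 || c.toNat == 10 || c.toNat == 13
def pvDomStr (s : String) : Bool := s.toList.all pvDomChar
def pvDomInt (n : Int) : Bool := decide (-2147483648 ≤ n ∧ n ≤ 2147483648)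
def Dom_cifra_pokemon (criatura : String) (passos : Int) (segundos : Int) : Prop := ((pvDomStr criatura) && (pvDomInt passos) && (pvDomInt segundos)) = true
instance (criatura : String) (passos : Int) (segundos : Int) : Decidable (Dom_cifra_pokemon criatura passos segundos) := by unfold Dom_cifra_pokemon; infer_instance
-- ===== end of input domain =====

-- B replaces A's passos-fold rotation of the alphabet list by a single (max passos 0) % 26
-- shift applied arithmetically per character, and sums the cipher codes in one pass
-- (objective: faster — O(len) instead of O(passos + len)).

set_option maxRecDepth 4000

-- ===== PORT A =====
def pvAlphabet : List Char :=
  ['a','b','c','d','e','f','g','h','i','j','k','l','m',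
   'n','o','p','q','r','s','t','u','v','w','x','y','z']

-- one iteration of `cifrado.append(cifrado.pop(0))` (the list is never empty here)
def pvRotStep (l : List Char) : List Char :=
  match l with
  | [] => []
  | x :: xs => xs ++ [x]

-- the `for i in range(passos)` rotation loop
def pvRotA (l : List Char) : Nat → List Char
  | 0 => l
  | n + 1 => pvRotA (pvRotStep l) n

def cifra_pokemon (criatura : String) (passos : Int) (segundos : Int) : String :=
  let alfabeto := pvAlphabet
  let cifrado := pvRotA pvAlphabet passos.toNat
  -- `nomecifrado` accumulation; `none` = the ValueError of `alfabeto.index` (excluded by Pre_)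
  let nome? := criatura.toList.foldl
    (fun acc? c => acc?.bind (fun st =>
      ((PySem.List.index? alfabeto (PySem.Chars.lowerChar c)).bind
        (fun k => PySem.List.pyGet? cifrado (k : Int))).map (fun ch => st ++ [ch])))
    (some ([] : List Char))
  match nome? with
  | none => ""
  | some nome =>
    let idn : Int := nome.foldl (fun a j => a + (j.toNat : Int)) 0
    let idn := idn * segundos
    match PySem.Str.pyGet? (PySem.Int.toStr idn) (-1) with
    | some c => String.ofList [c]
    | none => ""  -- unreachable: str(idn) is nonempty

-- ===== PORT B =====
def cifra_pokemon_alt (criatura : String) (passos : Int) (segundos : Int) : String :=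
  let shift := PySem.Int.mod (max passos 0) 26
  let total := criatura.toList.foldl
    (fun a c => a + (PySem.Int.mod (((PySem.Chars.lowerChar c).toNat : Int) - 97 + shift) 26 + 97)) 0
  match PySem.Str.pyGet? (PySem.Int.toStr (total * segundos)) (-1) with
  | some c => String.ofList [c]
  | none => ""  -- unreachable: str(n) is nonempty

-- ===== PRECONDITION & SPEC =====
-- Pre_ excludes exactly the inputs where `alfabeto.index(i.lower())` raises ValueError:
-- some character of criatura is not an ASCII letter.
-- c is an ASCII letter (codes 97–122 lower, 65–90 upper)
def pvLetter (c : Char) : Bool :=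
  (97 ≤ c.toNat && c.toNat ≤ 122) || (65 ≤ c.toNat && c.toNat ≤ 90)

def Pre_cifra_pokemon (criatura : String) (passos : Int) (segundos : Int) : Prop :=
  criatura.toList.all pvLetter = true

instance (criatura : String) (passos : Int) (segundos : Int) : Decidable (Pre_cifra_pokemon criatura passos segundos) := by unfold Pre_cifra_pokemon; infer_instance

def pvWitness_cifra_pokemon : String × Int × Int := ("Pikachu", 30, -7)

def Spec_cifra_pokemon (criatura : String) (passos : Int) (segundos : Int) (out : String) : Prop := out = cifra_pokemon_alt criatura passos segundos
instance (criatura : String) (passos : Int) (segundos : Int) (out : String) : Decidable (Spec_cifra_pokemon criatura passos segundos out) := by unfold Spec_cifra_pokemon; infer_instance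

-- ===== CLAIM (what is proved, stated in full; the proofs are below) =====
def Claim_equal_cifra_pokemon : Prop := ∀ (criatura : String) (passos : Int) (segundos : Int), Dom_cifra_pokemon criatura passos segundos → Pre_cifra_pokemon criatura passos segundos → Spec_cifra_pokemon criatura passos segundos (cifra_pokemon criatura passos segundos)


-- ===== LEMMAS AND PROOFS =====

-- the per-character cipher letter, as the proofs name it
def pvPhi (passos : Int) (c : Char) : Char :=
  pvAlphabet.getD (((PySem.Chars.lowerChar c).toNat - 97 + passos.toNat) % 26) 'a'

-- A's rotation loop is List.rotate
theorem pvRotStep_eq (l : List Char) : pvRotStep l = l.rotate 1 := by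
  cases l <;> simp [pvRotStep, List.rotate_cons_succ]

theorem pvRotA_eq_rotate (n : Nat) (l : List Char) : pvRotA l n = l.rotate n := by
  induction n generalizing l with
  | zero => simp [pvRotA]
  | succ n ih =>
    show pvRotA (pvRotStep l) n = _
    rw [ih, pvRotStep_eq, List.rotate_rotate]
    congr 1
    omega

-- the shift B computes is the rotation count mod 26
theorem pvShift_eq (passos : Int) :
    PySem.Int.mod (max passos 0) 26 = ((passos.toNat % 26 : Nat) : Int) := by
  by_cases h : passos ≤ 0
  · have h1 : max passos 0 = 0 := by omega
    have h2 : passos.toNat = 0 := by omega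
    rw [h1, h2]
    decide
  · have h1 : max passos 0 = ((passos.toNat : Nat) : Int) := by omega
    rw [h1]
    exact_mod_cast PySem.Int.mod_natCast passos.toNat 26

-- facts about the 26 alphabet letters (checked case by case)
theorem pvIndexChar : ∀ c ∈ pvAlphabet,
    PySem.List.index? pvAlphabet c = some (c.toNat - 97) ∧ 97 ≤ c.toNat ∧ c.toNat ≤ 122 := by
  intro c hc
  fin_cases hc <;> decide

theorem pvOrdAlpha : ∀ j ∈ List.range 26, (pvAlphabet.getD j 'a').toNat = 97 + j := by
  intro j hj
  fin_cases hj <;> decide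

theorem pvAlphaLen : pvAlphabet.length = 26 := by decide

-- A's table lookup for one admitted character equals B's arithmetic on its code
theorem pvChar (passos : Int) (c : Char) (hc : c ∈ pvAlphabet) :
    ((PySem.List.index? pvAlphabet c).bind
        (fun k => PySem.List.pyGet? (pvRotA pvAlphabet passos.toNat) (k : Int))).map
      (fun ch => ((ch.toNat : Int), ch))
    = some (PySem.Int.mod ((c.toNat : Int) - 97 + PySem.Int.mod (max passos 0) 26) 26 + 97,
            pvAlphabet.getD ((c.toNat - 97 + passos.toNat) % 26) 'a') := by
  obtain ⟨hidx, h97, h122⟩ := pvIndexChar c hc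
  have hklt : c.toNat - 97 < 26 := by omega
  have hlen : (pvRotA pvAlphabet passos.toNat).length = 26 := by
    rw [pvRotA_eq_rotate, List.length_rotate, pvAlphaLen]
  rw [hidx]
  simp only [Option.bind_some, PySem.List.pyGet?_natCast]
  rw [List.getElem?_eq_getElem (by omega)]
  have hgetr : (pvRotA pvAlphabet passos.toNat)[c.toNat - 97]'(by omega)
      = pvAlphabet[(c.toNat - 97 + passos.toNat) % pvAlphabet.length]'
          (Nat.mod_lt _ (by rw [pvAlphaLen]; omega)) := by
    have := List.getElem_rotate pvAlphabet passos.toNat (c.toNat - 97)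
      (by rw [List.length_rotate, pvAlphaLen]; omega)
    simpa [pvRotA_eq_rotate] using this
  have hmod : (c.toNat - 97 + passos.toNat) % pvAlphabet.length
      = (c.toNat - 97 + passos.toNat) % 26 := by rw [pvAlphaLen]
  have hmlt : (c.toNat - 97 + passos.toNat) % 26 < 26 := Nat.mod_lt _ (by omega)
  have hgetD : pvAlphabet[(c.toNat - 97 + passos.toNat) % pvAlphabet.length]'
          (Nat.mod_lt _ (by rw [pvAlphaLen]; omega))
      = pvAlphabet.getD ((c.toNat - 97 + passos.toNat) % 26) 'a' := by
    rw [List.getD_eq_getElem _ _ (by rw [pvAlphaLen]; omega)]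
    simp only [hmod]
  have hord := pvOrdAlpha ((c.toNat - 97 + passos.toNat) % 26) (by simp [List.mem_range, hmlt])
  rw [hgetr, hgetD, Option.map_some]
  refine congrArg some (Prod.ext ?_ rfl)
  dsimp only
  -- arithmetic: ord of the rotated letter = B's mod expression on the code
  rw [hord, pvShift_eq]
  have h1 : (c.toNat : Int) - 97 + ((passos.toNat % 26 : Nat) : Int)
      = (((c.toNat - 97 + passos.toNat % 26 : Nat)) : Int) := by push_cast; omega
  have h2 : PySem.Int.mod (((c.toNat - 97 + passos.toNat % 26 : Nat)) : Int) 26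
      = ((((c.toNat - 97 + passos.toNat % 26) % 26 : Nat)) : Int) := by
    exact_mod_cast PySem.Int.mod_natCast _ 26
  rw [h1, h2]
  push_cast
  omega

-- the A-side fold succeeds and produces exactly the pvPhi-mapped characters
theorem pvFoldA (passos : Int) (l : List Char) (acc : List Char)
    (hl : ∀ c ∈ l, PySem.Chars.lowerChar c ∈ pvAlphabet) :
    l.foldl
      (fun acc? c => acc?.bind (fun st =>
        ((PySem.List.index? pvAlphabet (PySem.Chars.lowerChar c)).bind
          (fun k => PySem.List.pyGet? (pvRotA pvAlphabet passos.toNat) (k : Int))).map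
          (fun ch => st ++ [ch])))
      (some acc)
    = some (acc ++ l.map (pvPhi passos)) := by
  induction l generalizing acc with
  | nil => simp
  | cons c t ih =>
    have hk := pvChar passos (PySem.Chars.lowerChar c) (hl c (by simp))
    simp only [List.foldl_cons]
    rcases hbind : (PySem.List.index? pvAlphabet (PySem.Chars.lowerChar c)).bind
        (fun k => PySem.List.pyGet? (pvRotA pvAlphabet passos.toNat) (k : Int)) with _ | ch
    · rw [hbind] at hk; simp at hk
    · rw [hbind] at hk
      simp only [Option.map_some, Option.some.injEq, Prod.mk.injEq] at hk
      simp only [Option.bind_some, Option.map_some]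
      rw [ih (acc ++ [ch]) (fun x hx => hl x (List.mem_cons_of_mem _ hx))]
      simp [pvPhi, hk.2]

-- summing the codes of the pvPhi-mapped characters is B's one-pass fold
theorem pvSum (passos : Int) (l : List Char)
    (hl : ∀ c ∈ l, PySem.Chars.lowerChar c ∈ pvAlphabet) (a : Int) :
    (l.map (pvPhi passos)).foldl (fun a j => a + (j.toNat : Int)) a
    = l.foldl (fun a c => a + (PySem.Int.mod (((PySem.Chars.lowerChar c).toNat : Int) - 97
        + PySem.Int.mod (max passos 0) 26) 26 + 97)) a := by
  induction l generalizing a with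
  | nil => rfl
  | cons c t ih =>
    have hk := pvChar passos (PySem.Chars.lowerChar c) (hl c (by simp))
    rcases hbind : (PySem.List.index? pvAlphabet (PySem.Chars.lowerChar c)).bind
        (fun k => PySem.List.pyGet? (pvRotA pvAlphabet passos.toNat) (k : Int)) with _ | ch
    · rw [hbind] at hk; simp at hk
    · rw [hbind] at hk
      simp only [Option.map_some, Option.some.injEq, Prod.mk.injEq] at hk
      simp only [List.map_cons, List.foldl_cons]
      have hphi : pvPhi passos c = ch := by rw [pvPhi, ← hk.2]
      rw [hphi, hk.1]
      exact ih (fun x hx => hl x (List.mem_cons_of_mem _ hx)) _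

-- an ASCII letter (either case) lowercases into the alphabet list
theorem pvPreMem (c : Char) (h : pvLetter c = true) :
    PySem.Chars.lowerChar c ∈ pvAlphabet := by
  have hb : (97 ≤ c.toNat ∧ c.toNat ≤ 122) ∨ (65 ≤ c.toNat ∧ c.toNat ≤ 90) := by
    simpa [pvLetter, Bool.or_eq_true, Bool.and_eq_true, decide_eq_true_eq] using h
  have hof : Char.ofNat c.toNat = c := Char.ofNat_toNat c
  rcases hb with ⟨h1, h2⟩ | ⟨h1, h2⟩ <;>
  · rw [← hof]
    interval_cases c.toNat <;> decide

-- ===== VERDICT (by name: the statement is the Claim_ definition above) =====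
theorem cifra_pokemon_spec : Claim_equal_cifra_pokemon := by
  intro criatura passos segundos _ hpre
  unfold Spec_cifra_pokemon
  have hpre' : ∀ c ∈ criatura.toList, PySem.Chars.lowerChar c ∈ pvAlphabet :=
    fun c hc => pvPreMem c (List.all_eq_true.mp hpre c hc)
  have hfold := pvFoldA passos criatura.toList [] hpre'
  have hsum := pvSum passos criatura.toList hpre' 0
  unfold cifra_pokemon cifra_pokemon_alt
  simp only [hfold, List.nil_append, hsum]
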